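-- pv_equiv track=rewrite | github.com/honopiofil/products_from_url | tagger.py | _find_words_positions
-- ===== SOURCE A (Python) =====
-- def _find_words_positions(phrase_list, text_list):
--     positions = []
--     i = 0
--     while i < len(text_list):
--         if text_list[i:i + len(phrase_list)] == phrase_list:
--             positions += list(range(i, i + len(phrase_list)))
--             i += len(phrase_list)
--         else:
--             i += 1
--     return set(positions)
-- ===== SOURCE B (Python) =====
-- def _match_starts(phrase_list, text_list):
--     k = len(phrase_list)
--     return [s for s in range(len(text_list)) if text_list[s:s + k] == phrase_list]
--
--
-- def _find_words_positions(phrase_list, text_list):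
--     k = len(phrase_list)
--     if k == 0:
--         return set()
--     positions = set()
--     next_free = 0
--     for s in _match_starts(phrase_list, text_list):
--         if s >= next_free:
--             positions.update(range(s, s + k))
--             next_free = s + k
--     return positions
-- ===== Notes on version B (the rewrite author's own statement) =====
-- stated objective: alternative
-- what changed: A is a single stateful while-loop that jumps its cursor past each match; B first precomputes the list of all (possibly overlapping) match start positions in one comprehension, then selects non-overlapping matches in a separate greedy pass with a next_free threshold.
-- outside the precondition, e.g. on _find_words_positions([], ['a']): A does not finish within the time limit, B returns set()
import Mathlib
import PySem

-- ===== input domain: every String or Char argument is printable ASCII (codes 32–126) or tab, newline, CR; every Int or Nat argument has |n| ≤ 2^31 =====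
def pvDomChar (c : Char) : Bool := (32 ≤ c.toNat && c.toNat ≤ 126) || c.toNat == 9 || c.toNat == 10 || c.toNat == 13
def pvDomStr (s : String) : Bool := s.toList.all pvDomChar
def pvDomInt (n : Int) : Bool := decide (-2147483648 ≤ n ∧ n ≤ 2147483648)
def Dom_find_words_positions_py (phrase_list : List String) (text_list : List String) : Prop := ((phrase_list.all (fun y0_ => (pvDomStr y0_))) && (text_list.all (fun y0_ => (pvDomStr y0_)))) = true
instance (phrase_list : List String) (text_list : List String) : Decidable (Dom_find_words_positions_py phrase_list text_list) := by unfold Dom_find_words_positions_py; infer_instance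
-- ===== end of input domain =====

-- B replaces A's jumping while-loop by a precomputed list of all match starts followed by a
-- greedy non-overlap selection pass (objective: alternative structure, same asymptotic cost).

-- ===== PORT A =====
-- A's while-loop; fuel bounds the iterations (i strictly increases whenever phrase_list ≠ []).
def findA_loop (phrase text : List String) : Nat → Int → List Int → List Int
  | 0, _, positions => positions
  | f + 1, i, positions =>
    if i < (text.length : Int) then
      if PySem.List.slice text (some i) (some (i + (phrase.length : Int))) == phrase then
        findA_loop phrase text f (i + (phrase.length : Int))
          (positions ++ PySem.List.pyRange i (i + (phrase.length : Int)) 1)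
      else
        findA_loop phrase text f (i + 1) positions
    else positions

def find_words_positions_py (phrase_list : List String) (text_list : List String) : List Int :=
  PySem.Set.ofList (findA_loop phrase_list text_list (text_list.length + 1) 0 [])

-- ===== PORT B =====
-- [s for s in range(len(text)) if text[s:s+k] == phrase], generalized to start at j (port uses j = 0)
def findB_startsFrom (phrase text : List String) (j : Nat) : List Int :=
  (PySem.List.pyRange (j : Int) (text.length : Int) 1).filter
    (fun s => PySem.List.slice text (some s) (some (s + (phrase.length : Int))) == phrase)

-- the greedy pass: keep a start s only if s ≥ next_free, then move next_free to s + k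
def findB_greedy (k : Int) : List Int → Int → List Int
  | [], _ => []
  | s :: rest, nf =>
    if nf ≤ s then PySem.List.pyRange s (s + k) 1 ++ findB_greedy k rest (s + k)
    else findB_greedy k rest nf

def find_words_positions_py_alt (phrase_list : List String) (text_list : List String) : List Int :=
  if phrase_list.length = 0 then []
  else PySem.Set.ofList
    (findB_greedy (phrase_list.length : Int) (findB_startsFrom phrase_list text_list 0) 0)

-- ===== PRECONDITION & SPEC =====
-- Pre_ excludes phrase_list = [] with nonempty text_list: there A's loop never advances i and diverges.
def Pre_find_words_positions_py (phrase_list : List String) (text_list : List String) : Prop :=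
  phrase_list ≠ [] ∨ text_list = []
instance (phrase_list : List String) (text_list : List String) : Decidable (Pre_find_words_positions_py phrase_list text_list) := by unfold Pre_find_words_positions_py; infer_instance

def pvWitness_find_words_positions_py : List String × List String := (["a"], ["a", "b", "a"])

def Spec_find_words_positions_py (phrase_list : List String) (text_list : List String) (out : List Int) : Prop := out = find_words_positions_py_alt phrase_list text_list
instance (phrase_list : List String) (text_list : List String) (out : List Int) : Decidable (Spec_find_words_positions_py phrase_list text_list out) := by unfold Spec_find_words_positions_py; infer_instance

-- ===== CLAIM (what is proved, stated in full; the proofs are below) =====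
def Claim_equal_find_words_positions_py : Prop := ∀ (phrase_list : List String) (text_list : List String), Dom_find_words_positions_py phrase_list text_list → Pre_find_words_positions_py phrase_list text_list → Spec_find_words_positions_py phrase_list text_list (find_words_positions_py phrase_list text_list)

-- ===== LEMMAS AND PROOFS =====

-- A's loop appends to its accumulator
theorem findA_loop_acc (phrase text : List String) (f : Nat) :
    ∀ (i : Int) (pos : List Int),
      findA_loop phrase text f i pos = pos ++ findA_loop phrase text f i [] := by
  induction f with
  | zero => intro i pos; simp [findA_loop]
  | succ f ih =>
    intro i pos
    simp only [findA_loop]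
    split
    · split
      · simp only [List.nil_append]
        rw [ih (i + (phrase.length : Int)) (pos ++ PySem.List.pyRange i (i + (phrase.length : Int)) 1),
            ih (i + (phrase.length : Int)) (PySem.List.pyRange i (i + (phrase.length : Int)) 1)]
        simp
      · exact ih (i + 1) pos
    · simp

-- starts whose value lies below the threshold are skipped by the greedy pass
theorem findB_greedy_skip (k : Int) (l2 : List Int) :
    ∀ (l : List Int) (nf : Int), (∀ s ∈ l, s < nf) →
      findB_greedy k (l ++ l2) nf = findB_greedy k l2 nf := by
  intro l
  induction l with
  | nil => intro nf _; simp
  | cons s rest ih =>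
    intro nf h
    have hs : s < nf := h s (by simp)
    simp only [List.cons_append, findB_greedy, if_neg (by omega : ¬ nf ≤ s)]
    exact ih nf (fun x hx => h x (by simp [hx]))

theorem mem_startsFrom (phrase text : List String) (j : Nat) :
    ∀ s ∈ findB_startsFrom phrase text j, (j : Int) ≤ s ∧ s < (text.length : Int) := by
  intro s hs
  have := List.of_mem_filter hs
  have hmem := List.mem_of_mem_filter hs
  exact (PySem.List.mem_pyRange_one.mp hmem)

theorem startsFrom_nil (phrase text : List String) (j : Nat) (h : text.length ≤ j) :
    findB_startsFrom phrase text j = [] := by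
  unfold findB_startsFrom
  rw [PySem.List.pyRange_one_eq_nil (by exact_mod_cast h)]
  rfl

-- main invariant: A's loop from index j computes the greedy pass over the starts from j
theorem main_inv (phrase text : List String) (hk : 1 ≤ phrase.length) :
    ∀ (f j : Nat) (nf : Int), text.length - j ≤ f → nf ≤ (j : Int) →
      findA_loop phrase text f (j : Int) [] =
        findB_greedy (phrase.length : Int) (findB_startsFrom phrase text j) nf := by
  intro f
  induction f with
  | zero =>
    intro j nf hf _
    rw [startsFrom_nil phrase text j (by omega)]
    simp [findA_loop, findB_greedy]
  | succ f ih =>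
    intro j nf hf hnf
    by_cases hj : j < text.length
    · have hdec : findB_startsFrom phrase text j =
          (if PySem.List.slice text (some (j : Int)) (some ((j : Int) + (phrase.length : Int))) == phrase
           then [((j : Nat) : Int)] else []) ++ findB_startsFrom phrase text (j + 1) := by
        unfold findB_startsFrom
        rw [PySem.List.pyRange_one_cons (by exact_mod_cast hj)]
        simp only [List.filter_cons]
        split <;> simp [Nat.cast_add]
      simp only [findA_loop, if_pos (by exact_mod_cast hj : (j : Int) < (text.length : Int))]
      by_cases hp : (PySem.List.slice text (some (j : Int)) (some ((j : Int) + (phrase.length : Int))) == phrase) = true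
      · rw [if_pos hp, hdec, if_pos hp]
        simp only [List.cons_append, List.nil_append, findB_greedy, if_pos hnf]
        rw [findA_loop_acc]
        congr 1
        have hcast : (j : Int) + (phrase.length : Int) = ((j + phrase.length : Nat) : Int) := by
          push_cast; ring
        rw [hcast]
        rw [ih (j + phrase.length) ((j + phrase.length : Nat) : Int) (by omega) le_rfl]
        by_cases hle : j + phrase.length ≤ text.length
        · have hsplit : findB_startsFrom phrase text (j + 1) =
              ((PySem.List.pyRange ((j + 1 : Nat) : Int) ((j + phrase.length : Nat) : Int) 1).filter
                (fun s => PySem.List.slice text (some s) (some (s + (phrase.length : Int))) == phrase))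
              ++ findB_startsFrom phrase text (j + phrase.length) := by
            unfold findB_startsFrom
            rw [PySem.List.pyRange_one_append ((j + 1 : Nat) : Int) ((j + phrase.length : Nat) : Int)
                  ((text.length : Nat) : Int) (by exact_mod_cast Nat.add_le_add_left hk j)
                  (by exact_mod_cast hle)]
            rw [List.filter_append]
          rw [hsplit, findB_greedy_skip _ _ _ _ (by
            intro s hs
            have := (PySem.List.mem_pyRange_one.mp (List.mem_of_mem_filter hs)).2
            push_cast at this ⊢
            omega)]
        · rw [startsFrom_nil phrase text (j + phrase.length) (by omega),
              ← List.append_nil (findB_startsFrom phrase text (j + 1)),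
              findB_greedy_skip _ _ _ _ (by
                intro s hs
                have := (mem_startsFrom phrase text (j + 1) s hs).2
                push_cast at this ⊢
                omega)]
      · rw [if_neg hp, hdec, if_neg hp, List.nil_append]
        have hcast : (j : Int) + 1 = ((j + 1 : Nat) : Int) := by push_cast; ring
        rw [hcast]
        exact ih (j + 1) nf (by omega) (by push_cast at hnf ⊢; omega)
    · rw [startsFrom_nil phrase text j (by omega)]
      simp only [findA_loop, findB_greedy]
      rw [if_neg (by exact_mod_cast hj : ¬ (j : Int) < (text.length : Int))]

-- ===== VERDICT (by name: the statement is the Claim_ definition above) =====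
theorem find_words_positions_py_spec : Claim_equal_find_words_positions_py := by
  intro phrase text _ hpre
  unfold Spec_find_words_positions_py
  rcases hpre with hp | ht
  · have hk : 1 ≤ phrase.length := by
      cases phrase with
      | nil => exact absurd rfl hp
      | cons a l => simp
    unfold find_words_positions_py find_words_positions_py_alt
    rw [if_neg (by omega)]
    congr 1
    have h0 : (0 : Int) = ((0 : Nat) : Int) := by norm_cast
    rw [h0, main_inv phrase text hk (text.length + 1) 0 0 (by omega) (by simp)]
    norm_num
  · subst ht
    unfold find_words_positions_py find_words_positions_py_alt
    rw [startsFrom_nil phrase [] 0 (by simp)]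
    simp [findA_loop, findB_greedy, PySem.Set.ofList]
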